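-- pv_equiv track=rewrite | github.com/binary-h0/problem-solve-book | problem_list/2357.py | init_segment
-- ===== SOURCE A (Python) =====
-- def init_segment(idx, s, e, seg, arr):
--     if s == e:
--         seg[idx] = (arr[s], arr[s])
--         return seg[idx]
--     mid = (s + e) // 2
--     l = init_segment(idx * 2, s, mid, seg, arr)
--     r = init_segment(idx * 2 + 1, mid + 1, e, seg, arr)
--     seg[idx] = (min(l[0], r[0]), max(l[1], r[1]))
--     return seg[idx]
-- ===== SOURCE B (Python) =====
-- def init_segment(idx, s, e, seg, arr):
--     # Iterative post-order traversal with an explicit work stack; child results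
--     # travel on a value stack.  Performs the same writes to seg as the recursion.
--     if s > e:
--         # the recursion never terminates on an empty range; refuse it up front
--         raise ValueError("init_segment: empty range")
--     work = [(idx, s, e, True)]
--     vals = []
--     while work:
--         i, a, b, descend = work.pop()
--         if a == b:
--             seg[i] = (arr[a], arr[a])
--             vals.append(seg[i])
--         elif descend:
--             m = (a + b) // 2
--             work.append((i, a, b, False))
--             work.append((2 * i + 1, m + 1, b, True))
--             work.append((2 * i, a, m, True))
--         else:
--             r = vals.pop()
--             l = vals.pop()
--             seg[i] = (min(l[0], r[0]), max(l[1], r[1]))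
--             vals.append(seg[i])
--     return vals.pop()
-- ===== Notes on version B (the rewrite author's own statement) =====
-- stated objective: alternative
-- what changed: The recursive tree build is replaced by an iterative post-order traversal: an explicit work stack of (index, lo, hi, descend) frames plus a value stack carrying child results, performing the same seg writes and returning the same (min, max) pair.
import Mathlib
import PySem

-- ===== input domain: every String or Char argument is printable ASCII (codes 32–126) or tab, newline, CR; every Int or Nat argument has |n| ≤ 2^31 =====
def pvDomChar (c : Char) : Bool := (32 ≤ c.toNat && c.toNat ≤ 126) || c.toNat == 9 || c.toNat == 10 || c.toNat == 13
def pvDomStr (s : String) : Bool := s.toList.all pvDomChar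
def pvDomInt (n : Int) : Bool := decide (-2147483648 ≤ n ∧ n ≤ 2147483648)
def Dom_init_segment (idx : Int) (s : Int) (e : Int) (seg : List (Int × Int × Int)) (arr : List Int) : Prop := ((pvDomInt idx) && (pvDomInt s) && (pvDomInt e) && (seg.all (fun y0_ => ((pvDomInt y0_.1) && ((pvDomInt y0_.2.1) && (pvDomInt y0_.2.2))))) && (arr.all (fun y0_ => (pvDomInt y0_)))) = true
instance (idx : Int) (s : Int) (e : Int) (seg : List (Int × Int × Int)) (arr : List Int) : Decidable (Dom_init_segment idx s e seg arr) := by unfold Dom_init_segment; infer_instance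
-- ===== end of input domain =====

-- B replaces the recursion by an iterative post-order traversal: an explicit work stack and a
-- value stack for child results (objective: alternative decomposition).  B performs the same
-- writes to seg as A; the equivalence proved here is about the RETURN value.

-- ===== PORT A =====
-- seg is a dict in the original program (typed here as its association list).  A only ever reads
-- back an entry it has just written, so the mutation is modeled exactly by a Dict overlay for the
-- written entries (seg's initial contents are never read, and dict assignment never raises).
-- The 'e < s' branch is a totality guard only: Python recurses forever there (excluded by Pre_).
def initSegA (idx : Int) (s : Int) (e : Int) (st : PySem.Dict Int (Int × Int)) (arr : List Int) :
    (Int × Int) × PySem.Dict Int (Int × Int) :=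
  if _hse : s = e then
    let v : Int × Int := ((PySem.List.pyGet? arr s).getD 0, (PySem.List.pyGet? arr s).getD 0)
    let st' := st.insert idx v
    (st'.getD idx (0, 0), st')                                  -- return seg[idx]
  else if _hes : e < s then ((0, 0), st)                        -- unreachable under Pre_ (Python diverges)
  else
    let mid := PySem.Int.floordiv (s + e) 2
    let lp := initSegA (idx * 2) s mid st arr
    let rp := initSegA (idx * 2 + 1) (mid + 1) e lp.2 arr
    let v : Int × Int := (min lp.1.1 rp.1.1, max lp.1.2 rp.1.2)
    let st3 := rp.2.insert idx v
    (st3.getD idx (0, 0), st3)                                  -- return seg[idx]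
termination_by (e - s).toNat
decreasing_by
  · have h := PySem.Int.floordiv_two_mid_bounds (le_of_lt (by omega : s < e))
    have h2 : PySem.Int.floordiv (s + e) 2 < e := by
      rw [PySem.Int.floordiv_lt_iff_lt_mul (by omega : (0:Int) < 2)]; omega
    omega
  · have h := PySem.Int.floordiv_two_mid_bounds (le_of_lt (by omega : s < e))
    omega

def init_segment (idx : Int) (s : Int) (e : Int) (_seg : List (Int × Int × Int)) (arr : List Int) : Int × Int :=
  (initSegA idx s e PySem.Dict.empty arr).1

-- ===== PORT B =====
-- The while loop over the two stacks, as a fuel recursion (the fuel is a totality guard only: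
-- 3n+1 exceeds the loop's 3n-2 iterations, proved sufficient in the lemmas below).  Python's
-- work/vals lists are used purely as stacks (append/pop at the end), modeled head-as-top.
-- seg's mutation is the same Dict overlay as in port A; vals.pop() on an empty list (never
-- reached: each combine frame is pushed after its two value-producing children) returns the
-- current state as a totality guard.
def runB (arr : List Int) : Nat → List (Int × Int × Int × Bool) → List (Int × Int) →
    PySem.Dict Int (Int × Int) → List (Int × Int) × PySem.Dict Int (Int × Int)
  | 0, _, vals, st => (vals, st)
  | fuel + 1, work, vals, st =>
    match work with
    | [] => (vals, st)
    | (i, a, b, descend) :: rest =>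
      if a = b then
        let st' := st.insert i ((PySem.List.pyGet? arr a).getD 0, (PySem.List.pyGet? arr a).getD 0)
        runB arr fuel rest (st'.getD i (0, 0) :: vals) st'       -- vals.append(seg[i])
      else if descend then
        let m := PySem.Int.floordiv (a + b) 2
        runB arr fuel ((2 * i, a, m, true) :: (2 * i + 1, m + 1, b, true) ::
                       (i, a, b, false) :: rest) vals st
      else
        -- r = vals.pop(); l = vals.pop()  (vals is never shorter than 2 here: each combine
        -- frame is pushed after its two value-producing children; headD is a totality guard)
        let r := vals.headD (0, 0)
        let l := (vals.drop 1).headD (0, 0)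
        let st' := st.insert i (min l.1 r.1, max l.2 r.2)
        runB arr fuel rest (st'.getD i (0, 0) :: vals.drop 2) st' -- vals.append(seg[i])

def init_segment_alt (idx : Int) (s : Int) (e : Int) (_seg : List (Int × Int × Int)) (arr : List Int) : Int × Int :=
  if e < s then (0, 0)  -- Python raises ValueError here (outside Pre_); a value for totality
  else (runB arr (3 * (e - s + 1).toNat + 1) [(idx, s, e, true)] [] PySem.Dict.empty).1.headD (0, 0)

-- ===== PRECONDITION & SPEC =====
-- Pre_ = exactly the inputs on which Python A returns: s ≤ e (otherwise the recursion never
-- terminates), and every arr index in [s, e] valid under Python's negative-index rule.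
-- seg is a dict in the original program, so seg[idx] = ... never raises for any idx.
def Pre_init_segment (idx : Int) (s : Int) (e : Int) (seg : List (Int × Int × Int)) (arr : List Int) : Prop :=
  s ≤ e ∧ -(arr.length : Int) ≤ s ∧ e < (arr.length : Int)
instance (idx : Int) (s : Int) (e : Int) (seg : List (Int × Int × Int)) (arr : List Int) : Decidable (Pre_init_segment idx s e seg arr) := by unfold Pre_init_segment; infer_instance

def pvWitness_init_segment : Int × Int × Int × (List (Int × Int × Int)) × List Int :=
  (1, 0, 1, [(0, 0, 0), (0, 0, 0), (0, 0, 0), (0, 0, 0)], [5, 7])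

def Spec_init_segment (idx : Int) (s : Int) (e : Int) (seg : List (Int × Int × Int)) (arr : List Int) (out : Int × Int) : Prop := out = init_segment_alt idx s e seg arr
instance (idx : Int) (s : Int) (e : Int) (seg : List (Int × Int × Int)) (arr : List Int) (out : Int × Int) : Decidable (Spec_init_segment idx s e seg arr out) := by unfold Spec_init_segment; infer_instance

-- ===== CLAIM (what is proved, stated in full; the proofs are below) =====
def Claim_equal_init_segment : Prop := ∀ (idx : Int) (s : Int) (e : Int) (seg : List (Int × Int × Int)) (arr : List Int), Dom_init_segment idx s e seg arr → Pre_init_segment idx s e seg arr → Spec_init_segment idx s e seg arr (init_segment idx s e seg arr)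

-- ===== LEMMAS AND PROOFS =====

-- value of arr[i] as both ports read it
def segVal (arr : List Int) (i : Int) : Int := (PySem.List.pyGet? arr i).getD 0

-- the two components of B's fold, separated
def segFMin (arr : List Int) (a : Int) (l : List Int) : Int :=
  l.foldl (fun x i => min (segVal arr i) x) a
def segFMax (arr : List Int) (a : Int) (l : List Int) : Int :=
  l.foldl (fun x i => max (segVal arr i) x) a

lemma segFMin_min (arr : List Int) (l : List Int) : ∀ (a b : Int),
    segFMin arr (min b a) l = min a (segFMin arr b l) := by
  induction l with
  | nil => intro a b; simp [segFMin, min_comm]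
  | cons i l ih =>
      intro a b
      simp only [segFMin, List.foldl_cons] at *
      rw [show min (segVal arr i) (min b a) = min (min (segVal arr i) b) a by
            rw [min_assoc]]
      exact ih a (min (segVal arr i) b)

lemma segFMax_max (arr : List Int) (l : List Int) : ∀ (a b : Int),
    segFMax arr (max b a) l = max a (segFMax arr b l) := by
  induction l with
  | nil => intro a b; simp [segFMax, max_comm]
  | cons i l ih =>
      intro a b
      simp only [segFMax, List.foldl_cons] at *
      rw [show max (segVal arr i) (max b a) = max (max (segVal arr i) b) a by
            rw [max_assoc]]
      exact ih a (max (segVal arr i) b)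

-- range split: pyRange a c = pyRange a b ++ pyRange b c for a ≤ b ≤ c
lemma pyRange_split (a b c : Int) (hab : a ≤ b) (hbc : b ≤ c) :
    PySem.List.pyRange a c 1 = PySem.List.pyRange a b 1 ++ PySem.List.pyRange b c 1 := by
  have key : ∀ n : Nat, PySem.List.pyRange a (b + n) 1
      = PySem.List.pyRange a b 1 ++ PySem.List.pyRange b (b + n) 1 := by
    intro n
    induction n with
    | zero => simp [PySem.List.pyRange_one_eq_nil (by omega : b + (0:Nat) ≤ a ∨ True) ]
    | succ k ih =>
        have h1 : (b + (k + 1 : Nat) : Int) = (b + k) + 1 := by push_cast; ring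
        rw [h1, PySem.List.pyRange_one_succ_right (by omega : a ≤ b + (k:Int)),
            PySem.List.pyRange_one_succ_right (by omega : b ≤ b + (k:Int)), ih]
        simp
  have hc : c = b + ((c - b).toNat : Int) := by omega
  rw [hc, key]

-- B's value, as a standalone function of (s, e, arr) — definitionally init_segment_alt
def segMM (arr : List Int) (s e : Int) : Int × Int :=
  (segFMin arr (segVal arr s) (PySem.List.pyRange (s + 1) (e + 1) 1),
   segFMax arr (segVal arr s) (PySem.List.pyRange (s + 1) (e + 1) 1))

lemma segFMin_cons (arr : List Int) (a i : Int) (l : List Int) :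
    segFMin arr a (i :: l) = segFMin arr (min (segVal arr i) a) l := rfl
lemma segFMax_cons (arr : List Int) (a i : Int) (l : List Int) :
    segFMax arr a (i :: l) = segFMax arr (max (segVal arr i) a) l := rfl
lemma segFMin_append (arr : List Int) (a : Int) (l1 l2 : List Int) :
    segFMin arr a (l1 ++ l2) = segFMin arr (segFMin arr a l1) l2 := List.foldl_append
lemma segFMax_append (arr : List Int) (a : Int) (l1 l2 : List Int) :
    segFMax arr a (l1 ++ l2) = segFMax arr (segFMax arr a l1) l2 := List.foldl_append

-- combining the two halves: for s ≤ mid < e, segMM s e is the min/max of the halves' values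
lemma segMM_split (arr : List Int) (s mid e : Int) (h1 : s ≤ mid) (h2 : mid < e) :
    segMM arr s e = (min (segMM arr s mid).1 (segMM arr (mid + 1) e).1,
                     max (segMM arr s mid).2 (segMM arr (mid + 1) e).2) := by
  unfold segMM
  rw [pyRange_split (s + 1) (mid + 1) (e + 1) (by omega) (by omega),
      PySem.List.pyRange_one_cons (by omega : mid + 1 < e + 1),
      segFMin_append, segFMax_append, segFMin_cons, segFMax_cons,
      segFMin_min, segFMax_max]

-- the stack machine pops a descend frame (i, a, b) with a ≤ b after exactly 3(b-a)+1 steps,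
-- leaving segMM arr a b on the value stack (and some overlay st')
lemma runB_frame (arr : List Int) : ∀ (N : Nat) (i a b : Int), a ≤ b → (b - a).toNat = N →
    ∀ (fuel : Nat) (rest : List (Int × Int × Int × Bool)) (vals : List (Int × Int))
      (st : PySem.Dict Int (Int × Int)), ∃ st',
    runB arr (fuel + (3 * N + 1)) ((i, a, b, true) :: rest) vals st
      = runB arr fuel rest (segMM arr a b :: vals) st' := by
  intro N
  induction N using Nat.strong_induction_on with
  | _ N ih =>
    intro i a b hab hN fuel rest vals st
    by_cases h : a = b
    · subst h
      have hN0 : N = 0 := by omega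
      subst hN0
      refine ⟨st.insert i ((PySem.List.pyGet? arr a).getD 0, (PySem.List.pyGet? arr a).getD 0), ?_⟩
      show runB arr (fuel + 1) _ _ _ = _
      rw [runB]
      simp [segMM, segVal,
            PySem.List.pyRange_one_eq_nil (by omega : a + 1 ≥ a + 1), segFMin, segFMax]
    · have hlt : a < b := by omega
      have hb := PySem.Int.floordiv_two_mid_bounds (le_of_lt hlt)
      have hmlt : PySem.Int.floordiv (a + b) 2 < b := by
        rw [PySem.Int.floordiv_lt_iff_lt_mul (by omega : (0:Int) < 2)]; omega
      set m := PySem.Int.floordiv (a + b) 2 with hm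
      have hNl : (m - a).toNat < N := by omega
      have hNr : (b - (m + 1)).toNat < N := by omega
      have hsum : 3 * N + 1 = 1 + (3 * (m - a).toNat + 1) + (3 * (b - (m + 1)).toNat + 1) + 1 := by
        omega
      -- step 1: the descend frame expands into left, right, combine
      have hstep : runB arr (fuel + (3 * N + 1)) ((i, a, b, true) :: rest) vals st
          = runB arr (fuel + (3 * N)) ((2 * i, a, m, true) :: (2 * i + 1, m + 1, b, true) ::
              (i, a, b, false) :: rest) vals st := by
        have : fuel + (3 * N + 1) = (fuel + 3 * N) + 1 := by omega
        rw [this, runB]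
        simp only [h, if_neg, not_false_iff, if_true]
        rw [hm]
      obtain ⟨st1, hL⟩ := ih (m - a).toNat hNl (2 * i) a m hb.1 rfl
        ((fuel + 1) + (3 * (b - (m + 1)).toNat + 1))
        ((2 * i + 1, m + 1, b, true) :: (i, a, b, false) :: rest) vals st
      obtain ⟨st2, hR⟩ := ih (b - (m + 1)).toNat hNr (2 * i + 1) (m + 1) b (by omega) rfl
        (fuel + 1) ((i, a, b, false) :: rest) (segMM arr a m :: vals) st1
      refine ⟨st2.insert i (min (segMM arr a m).1 (segMM arr (m + 1) b).1,
                            max (segMM arr a m).2 (segMM arr (m + 1) b).2), ?_⟩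
      rw [hstep]
      have harith : fuel + 3 * N = ((fuel + 1) + (3 * (b - (m + 1)).toNat + 1)) +
          (3 * (m - a).toNat + 1) := by omega
      rw [harith, hL, hR]
      show runB arr (fuel + 1) _ _ _ = _
      rw [runB]
      simp only [h, if_neg, not_false_iff]
      rw [segMM_split arr a m b hb.1 hmlt]
      simp

-- A's recursion computes segMM-- A's recursion computes segMM on every interval with s ≤ e
lemma initSegA_fst (arr : List Int) : ∀ (n : Nat) (idx s e : Int)
    (st : PySem.Dict Int (Int × Int)), (e - s).toNat = n → s ≤ e →
    (initSegA idx s e st arr).1 = segMM arr s e := by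
  intro n
  induction n using Nat.strong_induction_on with
  | _ n ih =>
    intro idx s e st hn hse
    by_cases h : s = e
    · subst h
      rw [initSegA]
      simp [segMM, segVal,
            PySem.List.pyRange_one_eq_nil (by omega : s + 1 ≥ s + 1), segFMin, segFMax]
    · have hlt : s < e := by omega
      have hb := PySem.Int.floordiv_two_mid_bounds (le_of_lt hlt)
      have hmlt : PySem.Int.floordiv (s + e) 2 < e := by
        rw [PySem.Int.floordiv_lt_iff_lt_mul (by omega : (0:Int) < 2)]; omega
      rw [initSegA]
      rw [dif_neg h, dif_neg (by omega : ¬ e < s)]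
      have hl := ih (PySem.Int.floordiv (s + e) 2 - s).toNat (by omega) (idx * 2) s
        (PySem.Int.floordiv (s + e) 2) st rfl (by omega)
      have hr := ih (e - (PySem.Int.floordiv (s + e) 2 + 1)).toNat (by omega) (idx * 2 + 1)
        (PySem.Int.floordiv (s + e) 2 + 1) e
        (initSegA (idx * 2) s (PySem.Int.floordiv (s + e) 2) st arr).2 rfl (by omega)
      simp only [hl, hr]
      rw [segMM_split arr s (PySem.Int.floordiv (s + e) 2) e hb.1 hmlt]
      simp

-- ===== VERDICT (by name: the statement is the Claim_ definition above) =====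
theorem init_segment_spec : Claim_equal_init_segment := by
  intro idx s e seg arr _hdom hpre
  unfold Spec_init_segment init_segment init_segment_alt
  have hse : s ≤ e := hpre.1
  rw [if_neg (by omega : ¬ e < s)]
  obtain ⟨st', hrun⟩ := runB_frame arr (e - s).toNat idx s e hse rfl 3 [] [] PySem.Dict.empty
  have hfuel : 3 * (e - s + 1).toNat + 1 = 3 + (3 * (e - s).toNat + 1) := by omega
  rw [hfuel, hrun]
  rw [initSegA_fst arr (e - s).toNat idx s e PySem.Dict.empty rfl hse]
  rfl
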